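-- pv_equiv track=rewrite | github.com/mnshm8231/AI-CUP-2025-Fall | del_seq.py | find_best_range
-- ===== SOURCE A (Python) =====
-- def find_best_range(sorted_unique_indices, tol):
--     """
--     找出允許缺號 tol 的最長 [L, R] 區間
--     """
--     if not sorted_unique_indices:
--         return None, None, 0, 0
--
--     n = len(sorted_unique_indices)
--     left = 0
--
--     best_L = sorted_unique_indices[0]
--     best_R = sorted_unique_indices[0]
--     best_range_len = 1
--     best_unique_cnt = 1
--
--     for right in range(n):
--         while left <= right:
--             L = sorted_unique_indices[left]
--             R = sorted_unique_indices[right]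
--
--             window_len = R - L + 1
--             unique_cnt = right - left + 1
--             missing = window_len - unique_cnt
--
--             if missing > tol:
--                 left += 1
--             else:
--                 if (window_len > best_range_len) or (
--                     window_len == best_range_len and unique_cnt > best_unique_cnt
--                 ):
--                     best_L = L
--                     best_R = R
--                     best_range_len = window_len
--                     best_unique_cnt = unique_cnt
--                 break
--
--     return best_L, best_R, best_range_len, best_unique_cnt
-- ===== SOURCE B (Python) =====
-- def _build(g, lo, hi):
--     # max segment tree over g[lo:hi] (hi > lo)
--     if hi - lo == 1:
--         return ('leaf', lo, g[lo])
--     mid = (lo + hi) // 2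
--     lt = _build(g, lo, mid)
--     rt = _build(g, mid, hi)
--     return ('node', lo, hi, max(_mx(lt), _mx(rt)), lt, rt)
--
--
-- def _mx(node):
--     return node[2] if node[0] == 'leaf' else node[3]
--
--
-- def _first_at_least(node, lo, thr):
--     # first index i >= lo inside node's range with g[i] >= thr, else None
--     if node[0] == 'leaf':
--         return node[1] if lo <= node[1] and thr <= node[2] else None
--     if node[2] <= lo or node[3] < thr:
--         return None
--     r = _first_at_least(node[4], lo, thr)
--     if r is None:
--         r = _first_at_least(node[5], lo, thr)
--     return r
--
--
-- def find_best_range(sorted_unique_indices, tol):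
--     if not sorted_unique_indices:
--         return None, None, 0, 0
--     xs = sorted_unique_indices
--     n = len(xs)
--     g = [xs[i] - i for i in range(n)]
--     tree = _build(g, 0, n)
--     best_L = best_R = xs[0]
--     best_len = 1
--     best_cnt = 1
--     left = 0
--     for right in range(n):
--         q = _first_at_least(tree, left, g[right] - tol)
--         if q is not None and q <= right:
--             left = q
--             window_len = xs[right] - xs[left] + 1
--             unique_cnt = right - left + 1
--             if window_len > best_len or (window_len == best_len and unique_cnt > best_cnt):
--                 best_L, best_R = xs[left], xs[right]
--                 best_len, best_cnt = window_len, unique_cnt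
--         else:
--             left = right + 1
--     return best_L, best_R, best_len, best_cnt
-- ===== Notes on version B (the rewrite author's own statement) =====
-- stated objective: alternative
-- what changed: Replaces A's incremental pointer scan (inner while loop) by a prebuilt range-maximum segment tree over g[i]=xs[i]-i, descended once per right bound to find the leftmost window start with g >= g[right]-tol; the carried left bound, update order and strict tie-break are unchanged, so the two agree on every input.
import Mathlib
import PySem

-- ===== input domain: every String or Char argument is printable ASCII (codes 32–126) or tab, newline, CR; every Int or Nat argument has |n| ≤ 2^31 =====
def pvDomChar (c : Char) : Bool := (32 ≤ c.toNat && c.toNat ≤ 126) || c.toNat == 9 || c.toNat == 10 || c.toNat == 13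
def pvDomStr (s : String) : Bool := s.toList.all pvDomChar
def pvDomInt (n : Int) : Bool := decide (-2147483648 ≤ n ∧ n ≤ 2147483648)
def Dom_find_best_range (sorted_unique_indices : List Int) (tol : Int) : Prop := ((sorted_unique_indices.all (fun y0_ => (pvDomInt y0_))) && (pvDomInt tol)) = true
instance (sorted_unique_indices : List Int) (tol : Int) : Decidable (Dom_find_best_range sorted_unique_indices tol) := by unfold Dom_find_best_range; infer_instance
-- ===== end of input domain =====

-- B replaces A's persistent two-pointer + inner while loop by a per-right binary search on
-- the non-decreasing array f[i] = xs[i] - i (objective: alternative algorithm, not faster).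

-- ===== PORT A =====
-- A's inner `while left <= right` loop; state = (left, best_L, best_R, best_range_len, best_unique_cnt).
-- Indices are always in range here (left ≤ right < len xs), so `getD` is exact for xs[left]/xs[right].
def pvAWhile (xs : List Int) (tol : Int) (right : Nat)
    (st : Nat × Int × Int × Int × Int) : Nat × Int × Int × Int × Int :=
  if _h : st.1 ≤ right then
    let L := xs.getD st.1 0
    let R := xs.getD right 0
    let window_len := R - L + 1
    let unique_cnt : Int := (right : Int) - (st.1 : Int) + 1
    let missing := window_len - unique_cnt
    if missing > tol then pvAWhile xs tol right (st.1 + 1, st.2)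
    else if window_len > st.2.2.2.1 ∨ (window_len = st.2.2.2.1 ∧ unique_cnt > st.2.2.2.2) then
      (st.1, L, R, window_len, unique_cnt)
    else st
  else st
termination_by right + 1 - st.1
decreasing_by omega

def find_best_range (sorted_unique_indices : List Int) (tol : Int) : Option Int × Option Int × Int × Int :=
  match sorted_unique_indices with
  | [] => (none, none, 0, 0)
  | x0 :: _ =>
    let n := sorted_unique_indices.length
    let st := (List.range n).foldl (fun st right => pvAWhile sorted_unique_indices tol right st)
      (0, x0, x0, 1, 1)
    (some st.2.1, some st.2.2.1, st.2.2.2.1, st.2.2.2.2)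

-- ===== PORT B =====
-- max segment tree over g (Source B's tuple trees): leaf idx val | node lo hi mx left right
inductive PvTree where
  | leaf : Nat → Int → PvTree
  | node : Nat → Nat → Int → PvTree → PvTree → PvTree

def PvTree.mx : PvTree → Int
  | .leaf _ v => v
  | .node _ _ m _ _ => m

-- Source B's _build; Python only ever calls it with hi - lo ≥ 1, where `hi - lo ≤ 1` ⟺ `hi - lo == 1`
def pvBuild (g : List Int) (lo hi : Nat) : PvTree :=
  if _h : hi - lo ≤ 1 then .leaf lo (g.getD lo 0)
  else
    let mid := (lo + hi) / 2
    let lt := pvBuild g lo mid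
    let rt := pvBuild g mid hi
    .node lo hi (max lt.mx rt.mx) lt rt
termination_by hi - lo
decreasing_by all_goals omega

-- Source B's _first_at_least; `r = left query; if r is None: r = right query` is the match below
def pvFirstAtLeast : PvTree → Nat → Int → Option Nat
  | .leaf i v, lo, thr => if lo ≤ i ∧ thr ≤ v then some i else none
  | .node _ h m a b, lo, thr =>
    if h ≤ lo ∨ m < thr then none
    else
      match pvFirstAtLeast a lo thr with
      | some i => some i
      | none => pvFirstAtLeast b lo thr

def find_best_range_alt (sorted_unique_indices : List Int) (tol : Int) : Option Int × Option Int × Int × Int :=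
  match sorted_unique_indices with
  | [] => (none, none, 0, 0)
  | x0 :: _ =>
    let xs := sorted_unique_indices
    let n := xs.length
    let g := (List.range n).map (fun i => xs.getD i 0 - (i : Int))
    let tree := pvBuild g 0 n
    let st := (List.range n).foldl (fun st right =>
      match pvFirstAtLeast tree st.1 (g.getD right 0 - tol) with
      | some q =>
        if q ≤ right then
          let window_len := xs.getD right 0 - xs.getD q 0 + 1
          let unique_cnt : Int := (right : Int) - (q : Int) + 1
          if window_len > st.2.2.2.1 ∨ (window_len = st.2.2.2.1 ∧ unique_cnt > st.2.2.2.2) then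
            (q, xs.getD q 0, xs.getD right 0, window_len, unique_cnt)
          else (q, st.2)
        else (right + 1, st.2)
      | none => (right + 1, st.2)) ((0 : Nat), x0, x0, (1 : Int), (1 : Int))
    (some st.2.1, some st.2.2.1, st.2.2.2.1, st.2.2.2.2)

-- ===== PRECONDITION & SPEC =====
def Spec_find_best_range (sorted_unique_indices : List Int) (tol : Int) (out : Option Int × Option Int × Int × Int) : Prop := out = find_best_range_alt sorted_unique_indices tol
instance (sorted_unique_indices : List Int) (tol : Int) (out : Option Int × Option Int × Int × Int) : Decidable (Spec_find_best_range sorted_unique_indices tol out) := by unfold Spec_find_best_range; infer_instance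

-- ===== CLAIM (what is proved, stated in full; the proofs are below) =====
def Claim_equal_find_best_range : Prop := ∀ (sorted_unique_indices : List Int) (tol : Int), Dom_find_best_range sorted_unique_indices tol → Spec_find_best_range sorted_unique_indices tol (find_best_range sorted_unique_indices tol)

-- ===== LEMMAS AND PROOFS =====

-- fd xs l = (the value xs[l] - l), the transformed array, as a function of the index
def pvFd (xs : List Int) (l : Nat) : Int := xs.getD l 0 - (l : Int)

-- the value A's inner while loop moves `left` to
def pvScan (xs : List Int) (tol : Int) (right left : Nat) : Nat :=
  if left ≤ right then
    if xs.getD right 0 - xs.getD left 0 - ((right : Int) - (left : Int)) > tol then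
      pvScan xs tol right (left + 1)
    else left
  else left
termination_by right + 1 - left
decreasing_by omega

theorem pvScan_ge (xs : List Int) (tol : Int) (right left : Nat) :
    left ≤ pvScan xs tol right left := by
  by_cases h : left ≤ right
  · by_cases hc : xs.getD right 0 - xs.getD left 0 - ((right : Int) - (left : Int)) > tol
    · have ih := pvScan_ge xs tol right (left + 1)
      rw [pvScan, if_pos h, if_pos hc]
      omega
    · rw [pvScan, if_pos h, if_neg hc]
  · rw [pvScan, if_neg h]
termination_by right + 1 - left
decreasing_by omega

theorem pvScan_le (xs : List Int) (tol : Int) (right left : Nat) (h : left ≤ right + 1) :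
    pvScan xs tol right left ≤ right + 1 := by
  by_cases hlr : left ≤ right
  · by_cases hc : xs.getD right 0 - xs.getD left 0 - ((right : Int) - (left : Int)) > tol
    · have ih := pvScan_le xs tol right (left + 1) (by omega)
      rw [pvScan, if_pos hlr, if_pos hc]
      exact ih
    · rw [pvScan, if_pos hlr, if_neg hc]
      omega
  · rw [pvScan, if_neg hlr]
    exact h
termination_by right + 1 - left
decreasing_by omega

theorem pvScan_inv (xs : List Int) (tol : Int) (right left l : Nat)
    (h1 : left ≤ l) (h2 : l < pvScan xs tol right left) :
    pvFd xs l < pvFd xs right - tol := by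
  by_cases hlr : left ≤ right
  · by_cases hc : xs.getD right 0 - xs.getD left 0 - ((right : Int) - (left : Int)) > tol
    · rw [pvScan, if_pos hlr, if_pos hc] at h2
      rcases Nat.lt_or_ge l (left + 1) with hl | hl
      · have hll : l = left := by omega
        subst hll
        simp only [pvFd]
        omega
      · exact pvScan_inv xs tol right (left + 1) l hl h2
    · rw [pvScan, if_pos hlr, if_neg hc] at h2
      omega
  · rw [pvScan, if_neg hlr] at h2
    omega
termination_by right + 1 - left
decreasing_by omega

theorem pvScan_hit (xs : List Int) (tol : Int) (right left : Nat)
    (h : pvScan xs tol right left ≤ right) :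
    pvFd xs right - tol ≤ pvFd xs (pvScan xs tol right left) := by
  by_cases hlr : left ≤ right
  · by_cases hc : xs.getD right 0 - xs.getD left 0 - ((right : Int) - (left : Int)) > tol
    · rw [pvScan, if_pos hlr, if_pos hc] at h ⊢
      exact pvScan_hit xs tol right (left + 1) h
    · rw [pvScan, if_pos hlr, if_neg hc] at h ⊢
      simp only [pvFd]
      omega
  · rw [pvScan, if_neg hlr] at h
    omega
termination_by right + 1 - left
decreasing_by omega

theorem pvAWhile_eq (xs : List Int) (tol : Int) (right : Nat) (st : Nat × Int × Int × Int × Int) :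
    pvAWhile xs tol right st =
      (let l := pvScan xs tol right st.1
       if l ≤ right then
         let L := xs.getD l 0
         let R := xs.getD right 0
         let wl := R - L + 1
         let uc : Int := (right : Int) - (l : Int) + 1
         if wl > st.2.2.2.1 ∨ (wl = st.2.2.2.1 ∧ uc > st.2.2.2.2) then (l, L, R, wl, uc)
         else (l, st.2)
       else (l, st.2)) := by
  by_cases h : st.1 ≤ right
  · by_cases hc : xs.getD right 0 - xs.getD st.1 0 + 1 - ((right : Int) - (st.1 : Int) + 1) > tol
    · have hc' : xs.getD right 0 - xs.getD st.1 0 - ((right : Int) - (st.1 : Int)) > tol := by omega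
      rw [pvAWhile, dif_pos h]
      simp only [if_pos hc]
      rw [pvAWhile_eq xs tol right (st.1 + 1, st.2)]
      conv_rhs => rw [pvScan, if_pos h, if_pos hc']
    · have hc' : ¬ (xs.getD right 0 - xs.getD st.1 0 - ((right : Int) - (st.1 : Int)) > tol) := by
        omega
      rw [pvAWhile, dif_pos h]
      simp only [if_neg hc]
      rw [pvScan, if_pos h, if_neg hc']
      simp only [if_pos h]
  · rw [pvAWhile, dif_neg h]
    rw [pvScan, if_neg h]
    simp only [if_neg h]
termination_by right + 1 - st.1
decreasing_by omega

theorem pv_flgetD (xs : List Int) (i : Nat) (hi : i < xs.length) :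
    ((List.range xs.length).map (fun i => xs.getD i 0 - (i : Int))).getD i 0 = pvFd xs i := by
  rw [List.getD_eq_getElem _ 0 (by simpa using hi)]
  simp [pvFd]


-- the tree built by pvBuild faithfully represents g on its index range
def pvGood (g : List Int) : PvTree → Nat → Nat → Prop
  | .leaf i v, lo, hi => lo = i ∧ hi = i + 1 ∧ v = g.getD i 0
  | .node l h m a b, lo, hi => l = lo ∧ h = hi ∧ (∀ i, lo ≤ i → i < hi → g.getD i 0 ≤ m) ∧
      ∃ mid, lo < mid ∧ mid < hi ∧ pvGood g a lo mid ∧ pvGood g b mid hi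

theorem pvGood_mx (g : List Int) (t : PvTree) (lo hi : Nat) (hg : pvGood g t lo hi) :
    ∀ i, lo ≤ i → i < hi → g.getD i 0 ≤ t.mx := by
  cases t with
  | leaf i0 v =>
    obtain ⟨h1, h2, h3⟩ := hg
    intro i hi1 hi2
    have hii : i = i0 := by omega
    rw [hii, ← h3]
    exact le_refl _
  | node nl nh m a b =>
    obtain ⟨_, _, hb, _⟩ := hg
    exact hb

theorem pvBuild_good (g : List Int) (lo hi : Nat) (h : lo < hi) :
    pvGood g (pvBuild g lo hi) lo hi := by
  by_cases h1 : hi - lo ≤ 1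
  · rw [pvBuild, dif_pos h1]
    exact ⟨rfl, by omega, rfl⟩
  · rw [pvBuild, dif_neg h1]
    have iha := pvBuild_good g lo ((lo + hi) / 2) (by omega)
    have ihb := pvBuild_good g ((lo + hi) / 2) hi (by omega)
    refine ⟨rfl, rfl, ?_, (lo + hi) / 2, by omega, by omega, iha, ihb⟩
    intro i hi1 hi2
    rcases Nat.lt_or_ge i ((lo + hi) / 2) with hc | hc
    · exact le_trans (pvGood_mx g _ _ _ iha i hi1 hc) (le_max_left _ _)
    · exact le_trans (pvGood_mx g _ _ _ ihb i hc hi2) (le_max_right _ _)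
termination_by hi - lo
decreasing_by all_goals omega

theorem pvQuery_spec (g : List Int) (t : PvTree) (lo hi q : Nat) (thr : Int)
    (hg : pvGood g t lo hi) :
    (pvFirstAtLeast t q thr = none → ∀ i, lo ≤ i → i < hi → q ≤ i → g.getD i 0 < thr) ∧
    (∀ i, pvFirstAtLeast t q thr = some i → q ≤ i ∧ lo ≤ i ∧ i < hi ∧ thr ≤ g.getD i 0 ∧
      ∀ j, lo ≤ j → j < i → q ≤ j → g.getD j 0 < thr) := by
  induction t generalizing lo hi with
  | leaf i0 v =>
    obtain ⟨h1, h2, h3⟩ := hg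
    constructor
    · intro hn i hi1 hi2 hi3
      have hii : i = i0 := by omega
      have hgi : g.getD i 0 = v := by rw [hii]; exact h3.symm
      simp only [pvFirstAtLeast] at hn
      by_cases hc : q ≤ i0 ∧ thr ≤ v
      · rw [if_pos hc] at hn; exact absurd hn (by simp)
      · rcases not_and_or.mp hc with hcon | hcon
        · exact absurd (by omega : q ≤ i0) hcon
        · rw [hgi]; omega
    · intro i hsome
      simp only [pvFirstAtLeast] at hsome
      by_cases hc : q ≤ i0 ∧ thr ≤ v
      · rw [if_pos hc] at hsome
        have hii : i0 = i := by simpa using hsome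
        have hgi : g.getD i 0 = v := by rw [← hii]; exact h3.symm
        refine ⟨by omega, by omega, by omega, by rw [hgi]; exact hc.2, ?_⟩
        intro j hj1 hj2 _
        exact absurd hj2 (by omega)
      · rw [if_neg hc] at hsome; exact absurd hsome (by simp)
  | node nl nh m a b iha ihb =>
    obtain ⟨h1, h2, hbnd, mid, hm1, hm2, ga, gb⟩ := hg
    have IA := iha lo mid ga
    have IB := ihb mid hi gb
    constructor
    · intro hn i hi1 hi2 hi3
      simp only [pvFirstAtLeast] at hn
      by_cases hguard : nh ≤ q ∨ m < thr
      · rcases hguard with hgu | hgu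
        · omega
        · exact lt_of_le_of_lt (hbnd i hi1 hi2) hgu
      · rw [if_neg hguard] at hn
        cases hqa : pvFirstAtLeast a q thr with
        | some x => rw [hqa] at hn; exact absurd hn (by simp)
        | none =>
          rw [hqa] at hn
          rcases Nat.lt_or_ge i mid with hc | hc
          · exact IA.1 hqa i hi1 hc hi3
          · exact IB.1 hn i hc hi2 hi3
    · intro i hsome
      simp only [pvFirstAtLeast] at hsome
      by_cases hguard : nh ≤ q ∨ m < thr
      · rw [if_pos hguard] at hsome; exact absurd hsome (by simp)
      · rw [if_neg hguard] at hsome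
        cases hqa : pvFirstAtLeast a q thr with
        | some x =>
          rw [hqa] at hsome
          have hx : x = i := by simpa using hsome
          obtain ⟨p1, p2, p3, p4, p5⟩ := IA.2 x hqa
          rw [hx] at p1 p2 p3 p4
          refine ⟨p1, p2, by omega, p4, ?_⟩
          intro j hj1 hj2 hj3
          exact p5 j hj1 (by omega) hj3
        | none =>
          rw [hqa] at hsome
          obtain ⟨p1, p2, p3, p4, p5⟩ := IB.2 i hsome
          refine ⟨p1, by omega, p3, p4, ?_⟩
          intro j hj1 hj2 hj3
          rcases Nat.lt_or_ge j mid with hc | hc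
          · exact IA.1 hqa j hj1 hc hj3
          · exact p5 j hc hj2 hj3

theorem pv_step (xs : List Int) (tol : Int) (r : Nat) (hrn : r < xs.length)
    (st : Nat × Int × Int × Int × Int) (hle : st.1 ≤ r) :
    pvAWhile xs tol r st =
      (match pvFirstAtLeast (pvBuild ((List.range xs.length).map (fun i => xs.getD i 0 - (i : Int))) 0 xs.length) st.1
          (((List.range xs.length).map (fun i => xs.getD i 0 - (i : Int))).getD r 0 - tol) with
      | some q =>
        if q ≤ r then
          let window_len := xs.getD r 0 - xs.getD q 0 + 1
          let unique_cnt : Int := (r : Int) - (q : Int) + 1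
          if window_len > st.2.2.2.1 ∨ (window_len = st.2.2.2.1 ∧ unique_cnt > st.2.2.2.2) then
            (q, xs.getD q 0, xs.getD r 0, window_len, unique_cnt)
          else (q, st.2)
        else (r + 1, st.2)
      | none => (r + 1, st.2)) := by
  have hn : 0 < xs.length := by omega
  have hgood := pvBuild_good ((List.range xs.length).map (fun i => xs.getD i 0 - (i : Int))) 0 xs.length hn
  have hq := pvQuery_spec ((List.range xs.length).map (fun i => xs.getD i 0 - (i : Int)))
    (pvBuild ((List.range xs.length).map (fun i => xs.getD i 0 - (i : Int))) 0 xs.length)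
    0 xs.length st.1 (((List.range xs.length).map (fun i => xs.getD i 0 - (i : Int))).getD r 0 - tol) hgood
  have htr : ((List.range xs.length).map (fun i => xs.getD i 0 - (i : Int))).getD r 0 = pvFd xs r :=
    pv_flgetD xs r hrn
  rw [pvAWhile_eq]
  have hs_ge := pvScan_ge xs tol r st.1
  have hs_le := pvScan_le xs tol r st.1 (by omega)
  cases hqr : pvFirstAtLeast (pvBuild ((List.range xs.length).map (fun i => xs.getD i 0 - (i : Int))) 0 xs.length) st.1
      (((List.range xs.length).map (fun i => xs.getD i 0 - (i : Int))).getD r 0 - tol) with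
  | none =>
    have hall := hq.1 hqr
    have hs : pvScan xs tol r st.1 = r + 1 := by
      by_contra hc
      have hsr : pvScan xs tol r st.1 ≤ r := by omega
      have hhit := pvScan_hit xs tol r st.1 hsr
      have := hall (pvScan xs tol r st.1) (by omega) (by omega) hs_ge
      rw [pv_flgetD xs _ (by omega), htr] at this
      omega
    simp only [hs]
    rw [if_neg (by omega)]
  | some i =>
    obtain ⟨p1, _, p3, p4, p5⟩ := hq.2 i hqr
    rw [pv_flgetD xs i p3, htr] at p4
    by_cases hir : i ≤ r
    · have hsi : pvScan xs tol r st.1 = i := by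
        have hle1 : pvScan xs tol r st.1 ≤ i := by
          by_contra hc
          have := pvScan_inv xs tol r st.1 i p1 (by omega)
          omega
        have hle2 : i ≤ pvScan xs tol r st.1 := by
          by_contra hc
          have hsr : pvScan xs tol r st.1 ≤ r := by omega
          have hhit := pvScan_hit xs tol r st.1 hsr
          have := p5 (pvScan xs tol r st.1) (by omega) (by omega) hs_ge
          rw [pv_flgetD xs _ (by omega), htr] at this
          omega
        omega
      simp only [hsi]
      simp only [if_pos hir]
    · have hs : pvScan xs tol r st.1 = r + 1 := by
        by_contra hc
        have hsr : pvScan xs tol r st.1 ≤ r := by omega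
        have hhit := pvScan_hit xs tol r st.1 hsr
        have := p5 (pvScan xs tol r st.1) (by omega) (by omega) hs_ge
        rw [pv_flgetD xs _ (by omega), htr] at this
        omega
      simp only [hs]
      rw [if_neg (by omega), if_neg hir]

theorem pv_fold_eq (xs : List Int) (tol : Int) (x0 : Int) (r : Nat) (hr : r ≤ xs.length) :
    ((List.range r).foldl (fun st right => pvAWhile xs tol right st)
        ((0 : Nat), x0, x0, (1 : Int), (1 : Int)))
      = (List.range r).foldl (fun st right =>
          match pvFirstAtLeast (pvBuild ((List.range xs.length).map (fun i => xs.getD i 0 - (i : Int))) 0 xs.length) st.1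
              (((List.range xs.length).map (fun i => xs.getD i 0 - (i : Int))).getD right 0 - tol) with
          | some q =>
            if q ≤ right then
              let window_len := xs.getD right 0 - xs.getD q 0 + 1
              let unique_cnt : Int := (right : Int) - (q : Int) + 1
              if window_len > st.2.2.2.1 ∨ (window_len = st.2.2.2.1 ∧ unique_cnt > st.2.2.2.2) then
                (q, xs.getD q 0, xs.getD right 0, window_len, unique_cnt)
              else (q, st.2)
            else (right + 1, st.2)
          | none => (right + 1, st.2)) ((0 : Nat), x0, x0, (1 : Int), (1 : Int))
    ∧ ((List.range r).foldl (fun st right => pvAWhile xs tol right st)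
        ((0 : Nat), x0, x0, (1 : Int), (1 : Int))).1 ≤ r := by
  induction r with
  | zero => exact ⟨rfl, Nat.le_refl _⟩
  | succ r ih =>
    obtain ⟨hAB, hle⟩ := ih (by omega)
    have hrn : r < xs.length := by omega
    simp only [List.range_succ, List.foldl_append, List.foldl_cons, List.foldl_nil]
    have hstep := pv_step xs tol r hrn
      ((List.range r).foldl (fun st right => pvAWhile xs tol right st)
        ((0 : Nat), x0, x0, (1 : Int), (1 : Int))) hle
    constructor
    · rw [hstep, hAB]
    · rw [hstep]
      cases hqr : pvFirstAtLeast (pvBuild ((List.range xs.length).map (fun i => xs.getD i 0 - (i : Int))) 0 xs.length)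
          ((List.range r).foldl (fun st right => pvAWhile xs tol right st)
            ((0 : Nat), x0, x0, (1 : Int), (1 : Int))).1
          (((List.range xs.length).map (fun i => xs.getD i 0 - (i : Int))).getD r 0 - tol) with
      | none => simp
      | some i =>
        by_cases hir : i ≤ r
        · simp only [if_pos hir]
          split <;> simp <;> omega
        · simp only [if_neg hir]
          simp

-- ===== VERDICT (by name: the statement is the Claim_ definition above) =====
theorem find_best_range_spec : Claim_equal_find_best_range := by
  intro xs tol _hdom
  unfold Spec_find_best_range
  cases xs with
  | nil => rfl
  | cons x0 rest =>
    have h := pv_fold_eq (x0 :: rest) tol x0 ((x0 :: rest).length) (Nat.le_refl _)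
    simp only [find_best_range, find_best_range_alt]
    rw [h.1]
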